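-- pv_equiv track=rewrite | github.com/danieljcheung/Pal | conversation.py | is_confirmation
-- ===== SOURCE A (Python) =====
-- CONFIRMATION_PATTERNS = [
--     "yes", "yeah", "yep", "correct", "right", "exactly", "mhm", "uh huh",
--     "that's right", "you got it", "bingo", "yup", "ya", "sure", "ok", "okay"
-- ]
--
-- def is_confirmation(message: str) -> bool:
--     """Check if message is a confirmation."""
--     msg_lower = message.lower().strip()
--     # Check exact matches first
--     if msg_lower in CONFIRMATION_PATTERNS:
--         return True
--     # Check if starts with confirmation word
--     for pattern in CONFIRMATION_PATTERNS:
--         if msg_lower.startswith(pattern + " ") or msg_lower.startswith(pattern + ","):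
--             return True
--     return False
-- ===== SOURCE B (Python) =====
-- CONFIRMATION_PATTERNS = [
--     "yes", "yeah", "yep", "correct", "right", "exactly", "mhm", "uh huh",
--     "that's right", "you got it", "bingo", "yup", "ya", "sure", "ok", "okay"
-- ]
-- _CONFIRMATION_SET = set(CONFIRMATION_PATTERNS)
--
-- def is_confirmation(message: str) -> bool:
--     """Check if message is a confirmation."""
--     msg = message.lower().strip()
--     if msg in _CONFIRMATION_SET:
--         return True
--     # single left-to-right scan: at each delimiter, look the prefix up in the set
--     for i, c in enumerate(msg):
--         if c in " ," and msg[:i] in _CONFIRMATION_SET: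
--             return True
--     return False
-- ===== Notes on version B (the rewrite author's own statement) =====
-- stated objective: alternative
-- what changed: Instead of looping over the 16 patterns and testing startswith on each, B scans the lowered/stripped message once left-to-right and at every space/comma delimiter looks the prefix up in a precomputed set of patterns (plus one whole-string lookup).
import Mathlib
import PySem

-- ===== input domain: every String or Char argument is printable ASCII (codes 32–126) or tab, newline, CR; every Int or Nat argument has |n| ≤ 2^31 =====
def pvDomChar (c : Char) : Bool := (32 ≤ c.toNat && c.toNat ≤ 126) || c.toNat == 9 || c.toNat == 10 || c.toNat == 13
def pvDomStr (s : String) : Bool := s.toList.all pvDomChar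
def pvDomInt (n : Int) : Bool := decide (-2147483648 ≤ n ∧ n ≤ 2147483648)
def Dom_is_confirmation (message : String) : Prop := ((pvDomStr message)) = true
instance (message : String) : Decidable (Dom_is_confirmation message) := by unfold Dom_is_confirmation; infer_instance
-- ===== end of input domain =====

-- B replaces the pattern-by-pattern startswith loop with one left-to-right delimiter scan
-- of the message, looking prefixes up in a precomputed set (alternative algorithm, same cost class).


-- ===== PORT A =====
def confirmationPatterns : List String :=
  ["yes", "yeah", "yep", "correct", "right", "exactly", "mhm", "uh huh",
   "that's right", "you got it", "bingo", "yup", "ya", "sure", "ok", "okay"]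

def is_confirmation (message : String) : Bool :=
  let msgLower := PySem.Str.strip (PySem.Str.lower message)
  if confirmationPatterns.contains msgLower then true
  else confirmationPatterns.any (fun p =>
    PySem.Str.startswith msgLower (p ++ " ") || PySem.Str.startswith msgLower (p ++ ","))

-- ===== PORT B =====
def confirmationSet : PySem.Set String := PySem.Set.ofList confirmationPatterns

def is_confirmation_alt (message : String) : Bool :=
  let msg := PySem.Str.strip (PySem.Str.lower message)
  if confirmationSet.contains msg then true
  else (PySem.List.enumerate msg.toList).any (fun ic =>
    (ic.2 == ' ' || ic.2 == ',') &&
      confirmationSet.contains (String.ofList (PySem.List.slice msg.toList none (some ic.1))))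

-- ===== PRECONDITION & SPEC =====
def Spec_is_confirmation (message : String) (out : Bool) : Prop := out = is_confirmation_alt message
instance (message : String) (out : Bool) : Decidable (Spec_is_confirmation message out) := by unfold Spec_is_confirmation; infer_instance

-- ===== CLAIM (what is proved, stated in full; the proofs are below) =====
def Claim_equal_is_confirmation : Prop := ∀ (message : String), Dom_is_confirmation message → Spec_is_confirmation message (is_confirmation message)

-- ===== LEMMAS AND PROOFS =====

-- a list ending in one delimiter char is a prefix of s iff s has that char right after the shorter prefix
theorem append_singleton_prefix_iff (p s : List Char) (c : Char) :
    (p ++ [c]) <+: s ↔ ∃ k, ∃ h : k < s.length, s.take k = p ∧ s[k] = c := by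
  constructor
  · rintro ⟨t, rfl⟩
    refine ⟨p.length, by simp, by simp, by simp⟩
  · rintro ⟨k, h, rfl, rfl⟩
    refine ⟨s.drop (k + 1), ?_⟩
    conv_rhs => rw [← List.take_append_drop k s]
    rw [List.drop_eq_getElem_cons h]
    simp

-- the membership tests of the two ports agree
theorem contains_set_eq (x : String) :
    confirmationSet.contains x = confirmationPatterns.contains x := by
  rw [Bool.eq_iff_iff]
  simp only [PySem.Set.contains, List.contains_iff_mem]
  exact PySem.Set.mem_ofList _ _

-- A's pattern loop equals B's delimiter scan, on any character list
theorem loops_agree (s : List Char) :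
    (confirmationPatterns.any (fun p =>
        PySem.Chars.startswith s (p.toList ++ [' ']) ||
        PySem.Chars.startswith s (p.toList ++ [','])))
    = ((PySem.List.enumerate s).any (fun ic =>
        (ic.2 == ' ' || ic.2 == ',') &&
          confirmationSet.contains (String.ofList (PySem.List.slice s none (some ic.1))))) := by
  rw [Bool.eq_iff_iff]
  simp only [List.any_eq_true, Bool.or_eq_true, PySem.Chars.startswith_iff,
    PySem.List.mem_enumerate_iff, Bool.and_eq_true, beq_iff_eq, contains_set_eq,
    List.contains_iff_mem]
  constructor
  · rintro ⟨p, hp, hpre⟩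
    rcases hpre with hpre | hpre <;>
      rcases (append_singleton_prefix_iff _ _ _).mp hpre with ⟨k, hk, htake, hc⟩
    · refine ⟨((k : Int), s[k]), ⟨k, hk, by simp⟩, Or.inl hc, ?_⟩
      dsimp only
      rw [PySem.List.slice_to _ (by positivity)]
      simpa [htake, String.ofList_toList] using hp
    · refine ⟨((k : Int), s[k]), ⟨k, hk, by simp⟩, Or.inr hc, ?_⟩
      dsimp only
      rw [PySem.List.slice_to _ (by positivity)]
      simpa [htake, String.ofList_toList] using hp
  · rintro ⟨ic, ⟨k, hk, rfl⟩, hc, hmem⟩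
    dsimp only at hc hmem
    rw [PySem.List.slice_to _ (by positivity)] at hmem
    simp only [zero_add, Int.toNat_natCast] at hmem
    refine ⟨String.ofList (s.take k), hmem, ?_⟩
    rcases hc with hc | hc
    · exact Or.inl ((append_singleton_prefix_iff _ _ _).mpr ⟨k, hk, by simp, hc⟩)
    · exact Or.inr ((append_singleton_prefix_iff _ _ _).mpr ⟨k, hk, by simp, hc⟩)

-- ===== VERDICT (by name: the statement is the Claim_ definition above) =====
theorem is_confirmation_spec : Claim_equal_is_confirmation := by
  intro message _
  unfold Spec_is_confirmation is_confirmation is_confirmation_alt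
  simp only [contains_set_eq]
  split_ifs with h
  · rfl
  · refine Eq.trans ?_ (loops_agree (PySem.Str.strip (PySem.Str.lower message)).toList)
    congr 1
    funext p
    simp [PySem.Str.startswith_eq]
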